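-- pv_equiv track=rewrite | github.com/StevenRen5/CodePath | TIP101/d6.py | longest_uniform_substring
-- ===== SOURCE A (Python) =====
-- def longest_uniform_substring(s):
--     count = 1
--     max_length = 1
--
--     for i in range(len(s)-1):
--         if s[i] == s[i+1]:
--             count += 1
--         else:
--             if count > max_length:
--                 max_length = count
--             count = 1
--
--     if count > max_length: # situation where we have only a unique letter in s or longestive consecutive letter is at the end
--         max_length = count
--
--     return max_length
-- ===== SOURCE B (Python) =====
-- def longest_uniform_substring(s):
--     # stage 1: boundary positions — before the string, after each change of
--     # character, and the end of the string; stage 2: the answer is the largest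
--     # gap between consecutive boundaries.
--     n = len(s)
--     edges = [-1] + [i for i in range(n - 1) if s[i] != s[i + 1]] + [n - 1]
--     return max(b - a for a, b in zip(edges, edges[1:]))
-- ===== Notes on version B (the rewrite author's own statement) =====
-- stated objective: alternative
-- what changed: B computes the list of boundary positions (start, every index where the character changes, end) in one comprehension and returns the largest gap between consecutive boundaries, instead of A's incremental counter-with-carry scan.
-- intended difference: On the empty string A returns 1 (an artifact of initializing count=1 and max_length=1), while B returns 0, the length of the longest run actually present, which is the intended value. — e.g. on longest_uniform_substring(""): A returns 1, B returns 0
import Mathlib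
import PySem

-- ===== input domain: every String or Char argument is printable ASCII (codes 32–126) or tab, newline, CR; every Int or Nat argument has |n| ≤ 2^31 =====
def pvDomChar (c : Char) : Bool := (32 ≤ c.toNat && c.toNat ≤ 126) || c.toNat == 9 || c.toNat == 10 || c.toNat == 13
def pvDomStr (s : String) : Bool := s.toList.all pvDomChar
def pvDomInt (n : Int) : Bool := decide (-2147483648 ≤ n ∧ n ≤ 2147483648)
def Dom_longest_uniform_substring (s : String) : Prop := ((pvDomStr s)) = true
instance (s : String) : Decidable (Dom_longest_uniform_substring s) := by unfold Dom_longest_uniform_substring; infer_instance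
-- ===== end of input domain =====

-- B replaces A's incremental counter-with-carry scan by a staged computation: collect the
-- boundary positions (start, every change of character, end) and take the largest gap
-- between consecutive boundaries (objective: alternative; B returns 0 on "", see D_).

-- ===== PORT A =====
def longest_uniform_substring (s : String) : Int :=
  let cs := s.toList
  let st := (PySem.List.pyRange 0 (PySem.Str.len s - 1) 1).foldl
    (fun (st : Int × Int) i =>
      if PySem.List.pyGet? cs i == PySem.List.pyGet? cs (i + 1) then (st.1 + 1, st.2)
      else (1, if st.1 > st.2 then st.1 else st.2)) (1, 1)
  if st.1 > st.2 then st.1 else st.2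

-- ===== PORT B =====
def longest_uniform_substring_alt (s : String) : Int :=
  let cs := s.toList
  let n : Int := PySem.Str.len s
  let edges : List Int := [-1] ++ ((PySem.List.pyRange 0 (n - 1) 1).filter
      (fun i => !(PySem.List.pyGet? cs i == PySem.List.pyGet? cs (i + 1)))) ++ [n - 1]
  match PySem.List.max? ((edges.zip edges.tail).map (fun p => p.2 - p.1)) (fun y => y) with
  | some m => m
  | none => 0   -- unreachable: edges always has at least two elements

-- ===== PRECONDITION & SPEC =====
-- On the empty string A returns 1 (artifact of initializing count = max_length = 1)
-- while B returns 0, the length of the longest run actually present — the intended value.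
def D_longest_uniform_substring (s : String) : Prop := s = ""
instance (s : String) : Decidable (D_longest_uniform_substring s) := by unfold D_longest_uniform_substring; infer_instance
def Spec_longest_uniform_substring (s : String) (out : Int) : Prop := ¬ D_longest_uniform_substring s → out = longest_uniform_substring_alt s
instance (s : String) (out : Int) : Decidable (Spec_longest_uniform_substring s out) := by unfold Spec_longest_uniform_substring; infer_instance

def pvDiffWitness_longest_uniform_substring : String := ""
def pvDiffWitnessOut_longest_uniform_substring : Int × Int := (1, 0)

-- ===== CLAIM (what is proved, stated in full; the proofs are below) =====
def Claim_unchanged_longest_uniform_substring : Prop := ∀ (s : String), Dom_longest_uniform_substring s → Spec_longest_uniform_substring s (longest_uniform_substring s)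
def Claim_changed_longest_uniform_substring : Prop := Dom_longest_uniform_substring (pvDiffWitness_longest_uniform_substring) ∧ D_longest_uniform_substring (pvDiffWitness_longest_uniform_substring) ∧ longest_uniform_substring (pvDiffWitness_longest_uniform_substring) = pvDiffWitnessOut_longest_uniform_substring.1 ∧ longest_uniform_substring_alt (pvDiffWitness_longest_uniform_substring) = pvDiffWitnessOut_longest_uniform_substring.2 ∧ pvDiffWitnessOut_longest_uniform_substring.1 ≠ pvDiffWitnessOut_longest_uniform_substring.2
def Claim_exact_longest_uniform_substring : Prop := ∀ (s : String), Dom_longest_uniform_substring s → D_longest_uniform_substring s → longest_uniform_substring s ≠ longest_uniform_substring_alt s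

-- ===== LEMMAS AND PROOFS =====

-- length of the maximal prefix of xs equal to c, plus the rest (proof-side run decomposition)
def pvSplitRun (c : Char) : List Char → Nat × List Char
  | [] => (0, [])
  | x :: xs => if x = c then ((pvSplitRun c xs).1 + 1, (pvSplitRun c xs).2) else (0, x :: xs)

theorem pvSplitRun_len (c : Char) (xs : List Char) : (pvSplitRun c xs).2.length ≤ xs.length := by
  induction xs with
  | nil => simp [pvSplitRun]
  | cons x xs ih =>
    by_cases h : x = c
    · simp only [pvSplitRun, if_pos h, List.length_cons]; omega
    · simp [pvSplitRun, h]

-- the list of maximal-run lengths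
def pvRunsOf : List Char → List Nat
  | [] => []
  | c :: xs => ((pvSplitRun c xs).1 + 1) :: pvRunsOf (pvSplitRun c xs).2
termination_by l => l.length
decreasing_by simpa using Nat.lt_succ_of_le (pvSplitRun_len _ _)

-- A's loop in structural form: walk the remaining characters comparing each to the previous one
def pvPairLoop : Char → List Char → Int × Int → Int × Int
  | _, [], st => st
  | c, x :: xs, st =>
    if x = c then pvPairLoop x xs (st.1 + 1, st.2)
    else pvPairLoop x xs (1, if st.1 > st.2 then st.1 else st.2)

theorem pv_loop_eq_pairLoop (rest : List Char) : ∀ (pre : List Char) (c : Char) (st : Int × Int),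
    (PySem.List.pyRange (pre.length : Int) ((pre.length : Int) + rest.length) 1).foldl
      (fun (st : Int × Int) i =>
        if PySem.List.pyGet? (pre ++ c :: rest) i == PySem.List.pyGet? (pre ++ c :: rest) (i + 1)
        then (st.1 + 1, st.2)
        else (1, if st.1 > st.2 then st.1 else st.2)) st
      = pvPairLoop c rest st := by
  induction rest with
  | nil => intro pre c st; simp [PySem.List.pyRange_one_eq_nil, pvPairLoop]
  | cons x xs ih =>
    intro pre c st
    have hlt : (pre.length : Int) < (pre.length : Int) + (x :: xs).length := by
      simp only [List.length_cons]; push_cast; omega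
    rw [PySem.List.pyRange_one_cons hlt]
    simp only [List.foldl_cons]
    rw [PySem.List.pyGet?_append_length pre (x :: xs) c]
    have h2 : PySem.List.pyGet? (pre ++ c :: x :: xs) ((pre.length : Int) + 1) = some x := by
      have := PySem.List.pyGet?_append_right (pre := pre) (ys := c :: x :: xs) (k := 1)
      simpa using this
    rw [h2]
    have hbnd : (pre.length : Int) + ((x :: xs).length : Int) = ((pre.length : Int) + 1) + (xs.length : Int) := by
      simp only [List.length_cons]; push_cast; ring
    by_cases h : x = c
    · rw [if_pos (by simp [h])]
      simp only [pvPairLoop, if_pos h]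
      have := ih (pre ++ [c]) x (st.1 + 1, st.2)
      simp only [List.append_assoc, List.singleton_append, List.length_append,
        List.length_cons, List.length_nil, Nat.cast_add, Nat.cast_one, zero_add] at this
      rw [hbnd]
      exact this
    · rw [if_neg (by simp only [beq_iff_eq, Option.some.injEq]; exact fun hc => h hc.symm)]
      simp only [pvPairLoop, if_neg h]
      have := ih (pre ++ [c]) x (1, if st.1 > st.2 then st.1 else st.2)
      simp only [List.append_assoc, List.singleton_append, List.length_append,
        List.length_cons, List.length_nil, Nat.cast_add, Nat.cast_one, zero_add] at this
      rw [hbnd]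
      exact this

theorem pv_pairLoop_eq_runs (rest : List Char) : ∀ (c : Char) (count maxl : Int),
    (if (pvPairLoop c rest (count, maxl)).1 > (pvPairLoop c rest (count, maxl)).2
     then (pvPairLoop c rest (count, maxl)).1 else (pvPairLoop c rest (count, maxl)).2)
      = ((count + Int.ofNat (pvSplitRun c rest).1) ::
          (pvRunsOf (pvSplitRun c rest).2).map Int.ofNat).foldl
        (fun a b => if b > a then b else a) maxl := by
  induction rest with
  | nil =>
    intro c count maxl
    simp only [pvPairLoop, pvSplitRun, pvRunsOf, List.map_nil, List.foldl_cons, List.foldl_nil]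
    norm_num
  | cons x xs ih =>
    intro c count maxl
    by_cases h : x = c
    · simp only [pvPairLoop, pvSplitRun, if_pos h]
      subst h
      rw [ih x (count + 1) maxl]
      congr 2
      simp only [Int.ofNat_eq_natCast]
      push_cast
      ring
    · simp only [pvPairLoop, pvSplitRun, if_neg h]
      rw [ih x 1 (if count > maxl then count else maxl)]
      simp only [pvRunsOf, List.map_cons, List.foldl_cons]
      congr 1
      · simp only [Int.ofNat_eq_natCast]; push_cast; split_ifs <;> omega

-- B's comprehension in structural form: j is the index of the current character c;
-- record j whenever the next character differs
def pvBreaks : Int → Char → List Char → List Int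
  | _, _, [] => []
  | j, c, x :: xs => if x = c then pvBreaks (j + 1) x xs else j :: pvBreaks (j + 1) x xs

theorem pv_filter_eq_breaks (rest : List Char) : ∀ (pre : List Char) (c : Char),
    (PySem.List.pyRange (pre.length : Int) ((pre.length : Int) + rest.length) 1).filter
      (fun i => !(PySem.List.pyGet? (pre ++ c :: rest) i == PySem.List.pyGet? (pre ++ c :: rest) (i + 1)))
      = pvBreaks (pre.length : Int) c rest := by
  induction rest with
  | nil => intro pre c; simp [PySem.List.pyRange_one_eq_nil, pvBreaks]
  | cons x xs ih =>
    intro pre c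
    have hlt : (pre.length : Int) < (pre.length : Int) + (x :: xs).length := by
      simp only [List.length_cons]; push_cast; omega
    rw [PySem.List.pyRange_one_cons hlt]
    rw [List.filter_cons]
    rw [PySem.List.pyGet?_append_length pre (x :: xs) c]
    have h2 : PySem.List.pyGet? (pre ++ c :: x :: xs) ((pre.length : Int) + 1) = some x := by
      have := PySem.List.pyGet?_append_right (pre := pre) (ys := c :: x :: xs) (k := 1)
      simpa using this
    rw [h2]
    have hbnd : (pre.length : Int) + ((x :: xs).length : Int) = ((pre.length : Int) + 1) + (xs.length : Int) := by
      simp only [List.length_cons]; push_cast; ring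
    have hrec := ih (pre ++ [c]) x
    simp only [List.append_assoc, List.singleton_append, List.length_append,
      List.length_cons, List.length_nil, Nat.cast_add, Nat.cast_one, zero_add] at hrec
    by_cases h : x = c
    · have hc : (!(some c == some x)) = false := by simp [h]
      rw [hc, if_neg (by simp)]
      simp only [pvBreaks, if_pos h]
      rw [hbnd]
      exact hrec
    · have hc : (!(some c == some x)) = true := by
        simp only [Bool.not_eq_eq_eq_not, Bool.not_true, beq_eq_false_iff_ne, ne_eq,
          Option.some.injEq]
        exact fun hcx => h hcx.symm
      rw [hc, if_pos rfl]
      simp only [pvBreaks, if_neg h]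
      rw [hbnd]
      exact congrArg (List.cons ((pre.length : Int))) hrec

-- gap list over consecutive boundary pairs, structurally
def pvDiffs : Int → List Int → List Int
  | _, [] => []
  | a, b :: rest => (b - a) :: pvDiffs b rest

theorem pv_zip_diffs (es : List Int) : ∀ (a : Int),
    ((a :: es).zip (a :: es).tail).map (fun p => p.2 - p.1) = pvDiffs a es := by
  induction es with
  | nil => intro a; simp [pvDiffs]
  | cons b es ih =>
    intro a
    simp only [List.tail_cons, List.zip_cons_cons, List.map_cons, pvDiffs]
    have := ih b
    simp only [List.tail_cons] at this
    rw [this]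

theorem pv_diffs_eq_runs (rest : List Char) : ∀ (c : Char) (e0 j : Int),
    pvDiffs e0 (pvBreaks j c rest ++ [j + rest.length])
      = (j - e0 + Int.ofNat (pvSplitRun c rest).1) ::
        (pvRunsOf (pvSplitRun c rest).2).map Int.ofNat := by
  induction rest with
  | nil =>
    intro c e0 j
    simp [pvBreaks, pvSplitRun, pvRunsOf, pvDiffs]
  | cons x xs ih =>
    intro c e0 j
    by_cases h : x = c
    · simp only [pvBreaks, pvSplitRun, if_pos h, List.length_cons]
      have heq : j + ((xs.length : Int) + 1) = (j + 1) + (xs.length : Int) := by ring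
      rw [show (j + ((xs.length + 1 : Nat) : Int)) = (j + 1) + (xs.length : Int) by push_cast; ring]
      rw [ih x e0 (j + 1)]
      subst h
      congr 1
      simp only [Int.ofNat_eq_natCast]
      push_cast
      ring
    · simp only [pvBreaks, pvSplitRun, if_neg h, List.cons_append, pvDiffs, List.length_cons]
      rw [show (j + ((xs.length + 1 : Nat) : Int)) = (j + 1) + (xs.length : Int) by push_cast; ring]
      rw [ih x j (j + 1)]
      simp only [pvRunsOf, List.map_cons]
      congr 1
      · simp
      · congr 1
        simp only [Int.ofNat_eq_natCast]
        push_cast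
        ring

theorem pv_step_eq_max : (fun (a b : Int) => if b > a then b else a) = (fun (a b : Int) => max a b) := by
  funext a b
  rcases lt_or_ge a b with hlt | hge
  · rw [if_pos hlt, max_eq_right hlt.le]
  · rw [if_neg (not_lt.mpr hge), max_eq_left hge]

theorem pv_nonempty (s : String) (c : Char) (rest : List Char) (hcs : s.toList = c :: rest) :
    longest_uniform_substring s = longest_uniform_substring_alt s := by
  unfold longest_uniform_substring longest_uniform_substring_alt
  have hlen : PySem.Str.len s - 1 = ((0 : Int) + rest.length) := by
    simp [PySem.Str.len_eq, hcs]
  rw [hcs, hlen]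
  dsimp only
  -- A side
  have hloop := pv_loop_eq_pairLoop rest [] c (1, 1)
  simp only [List.length_nil, Nat.cast_zero, List.nil_append] at hloop
  have hif : ∀ (u v : Int × Int), u = v →
      (if u.1 > u.2 then u.1 else u.2) = (if v.1 > v.2 then v.1 else v.2) := by
    intro u v h; rw [h]
  refine (hif _ _ hloop).trans ?_
  rw [pv_pairLoop_eq_runs rest c 1 1]
  -- B side
  have hfil := pv_filter_eq_breaks rest [] c
  simp only [List.length_nil, Nat.cast_zero, List.nil_append] at hfil
  rw [hlen, hfil]
  rw [show ([-1] ++ pvBreaks 0 c rest ++ [(0 : Int) + rest.length])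
        = (-1) :: (pvBreaks 0 c rest ++ [(0 : Int) + rest.length]) by simp]
  rw [pv_zip_diffs (pvBreaks 0 c rest ++ [(0 : Int) + rest.length]) (-1)]
  rw [pv_diffs_eq_runs rest c (-1) 0]
  rw [PySem.List.max?_id_cons]
  dsimp only
  -- both sides are a strict-improvement fold from the first run length
  rw [List.foldl_cons]
  have hhead : (0 : Int) - (-1) + Int.ofNat (pvSplitRun c rest).1
      = 1 + Int.ofNat (pvSplitRun c rest).1 := by ring
  rw [hhead]
  have hinit : (if (1 + Int.ofNat (pvSplitRun c rest).1) > (1 : Int) then 1 + Int.ofNat (pvSplitRun c rest).1 else 1)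
      = 1 + Int.ofNat (pvSplitRun c rest).1 := by
    simp only [Int.ofNat_eq_natCast]
    split_ifs <;> omega
  rw [hinit, pv_step_eq_max]

-- ===== VERDICT (by name: the statement is the Claim_ definition above) =====
theorem longest_uniform_substring_spec : Claim_unchanged_longest_uniform_substring := by
  intro s _ hD
  have hne : s.toList ≠ [] := by
    intro h
    exact hD (by unfold D_longest_uniform_substring; exact String.ext (by simp [h]))
  cases hcs : s.toList with
  | nil => exact absurd hcs hne
  | cons c rest => exact pv_nonempty s c rest hcs

theorem longest_uniform_substring_changed : Claim_changed_longest_uniform_substring := by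
  unfold Claim_changed_longest_uniform_substring; decide

theorem longest_uniform_substring_tight : Claim_exact_longest_uniform_substring := by
  intro s _ hD
  unfold D_longest_uniform_substring at hD
  subst hD
  decide
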